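-- pv_equiv track=rewrite | github.com/jdfoxito/Cobolsnoooy- | lito/lito/jd/datos/Reportes.py | costelo
-- ===== SOURCE A (Python) =====
-- def costelo(num):
--     '''codificacion texto'''
--     vector = [0, 1]
--     longitud = len(num)
--     lista = []
--     for i in range(longitud):
--         x = vector[0] + vector[1]
--         vector[0] = vector[1]
--         vector[1] = x
--         coeficiente = int(num[i]) - int(str(x)[-1])
--         lista.append(str(coeficiente + 10 if coeficiente < 0 else coeficiente))
--     return (''.join(lista))+'001'
-- ===== SOURCE B (Python) =====
-- # Last digits of the sequence x = 1, 2, 3, 5, 8, ... (Fibonacci), which are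
-- # periodic with period 60 (Pisano period of 10).
-- _TABLA = [1, 2, 3, 5, 8, 3, 1, 4, 5, 9, 4, 3, 7, 0, 7, 7, 4, 1, 5, 6,
--           1, 7, 8, 5, 3, 8, 1, 9, 0, 9, 9, 8, 7, 5, 2, 7, 9, 6, 5, 1,
--           6, 7, 3, 0, 3, 3, 6, 9, 5, 4, 9, 3, 2, 5, 7, 2, 9, 1, 0, 1]
--
--
-- def costelo(num):
--     '''codificacion texto'''
--     lista = [str((int(c) - _TABLA[i % 60]) % 10) for i, c in enumerate(num)]
--     return ''.join(lista) + '001'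
-- ===== Notes on version B (the rewrite author's own statement) =====
-- stated objective: faster
-- what changed: Replaces the incremental big-integer Fibonacci state and per-step str(x)[-1] digit extraction by a precomputed 60-entry Pisano-period table of last digits indexed by i % 60, and replaces the conditional +10 adjustment by % 10.
import Mathlib
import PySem

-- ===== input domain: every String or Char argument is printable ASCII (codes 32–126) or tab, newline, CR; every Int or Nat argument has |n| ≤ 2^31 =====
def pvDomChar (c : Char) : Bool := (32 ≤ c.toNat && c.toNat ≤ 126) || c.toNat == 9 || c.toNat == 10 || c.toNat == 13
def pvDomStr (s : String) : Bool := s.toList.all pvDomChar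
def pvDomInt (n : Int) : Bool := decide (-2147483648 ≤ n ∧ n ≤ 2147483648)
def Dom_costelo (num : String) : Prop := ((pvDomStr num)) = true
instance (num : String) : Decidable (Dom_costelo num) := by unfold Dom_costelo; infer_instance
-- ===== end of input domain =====

-- B replaces A's incremental big-integer Fibonacci state and str(x)[-1] digit extraction
-- by a precomputed 60-entry Pisano-period table of last digits indexed by i % 60.

-- ===== PORT A =====
-- int(str(x)[-1]): str(x) is never empty, so the pyGetD default is unreachable;
-- the extracted char is a decimal digit, so ofChars? is always some.
def lastDigitA (x : Int) : Int :=
  (PySem.Int.ofChars? [PySem.List.pyGetD (PySem.Int.toChars x) (-1) ' ']).getD 0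

-- one iteration of A's for-loop body, applied to num[i]; state = (vector[0], vector[1], lista)
def stepA (st : Int × Int × List (List Char)) (c : Char) : Int × Int × List (List Char) :=
  let x := st.1 + st.2.1
  let coeficiente := (PySem.Int.ofChars? [c]).getD 0 - lastDigitA x
  (st.2.1, x,
    st.2.2 ++ [PySem.Int.toChars (if coeficiente < 0 then coeficiente + 10 else coeficiente)])

def costelo (num : String) : String :=
  let longitud := PySem.Str.len num
  let fin := (PySem.List.pyRange 0 longitud).foldl
    (fun st i => stepA st (PySem.List.pyGetD num.toList i ' ')) (0, 1, [])
  String.ofList (PySem.Chars.join [] fin.2.2 ++ ['0', '0', '1'])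

-- ===== PORT B =====
-- _TABLA from Source B: last digits of the Fibonacci sequence 1, 2, 3, 5, … (period 60)
def tablaB : List Int :=
  [1, 2, 3, 5, 8, 3, 1, 4, 5, 9, 4, 3, 7, 0, 7, 7, 4, 1, 5, 6,
   1, 7, 8, 5, 3, 8, 1, 9, 0, 9, 9, 8, 7, 5, 2, 7, 9, 6, 5, 1,
   6, 7, 3, 0, 3, 3, 6, 9, 5, 4, 9, 3, 2, 5, 7, 2, 9, 1, 0, 1]

def costelo_alt (num : String) : String :=
  let lista := (PySem.List.enumerate num.toList).map (fun p =>
    PySem.Int.toChars (PySem.Int.mod ((PySem.Int.ofChars? [p.2]).getD 0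
      - PySem.List.pyGetD tablaB (PySem.Int.mod p.1 60) 0) 10))
  String.ofList (PySem.Chars.join [] lista ++ ['0', '0', '1'])

-- ===== PRECONDITION & SPEC =====
-- Pre_: every character of num is a decimal digit; on any other character int(num[i]) raises ValueError.
def Pre_costelo (num : String) : Prop := num.toList.all PySem.Chars.isdigit = true
instance (num : String) : Decidable (Pre_costelo num) := by unfold Pre_costelo; infer_instance
def pvWitness_costelo : String := "9012345678"

def Spec_costelo (num : String) (out : String) : Prop := out = costelo_alt num
instance (num : String) (out : String) : Decidable (Spec_costelo num out) := by unfold Spec_costelo; infer_instance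

-- ===== CLAIM (what is proved, stated in full; the proofs are below) =====
def Claim_equal_costelo : Prop := ∀ (num : String), Dom_costelo num → Pre_costelo num → Spec_costelo num (costelo num)

-- ===== LEMMAS AND PROOFS =====

-- tmod n = last digit of the n-th Fibonacci number (F 0 = 0, F 1 = 1), read off the table
def tmod (n : Nat) : Int := tablaB.getD ((n + 58) % 60) 0

-- B's per-character map function (definitionally the lambda in costelo_alt)
def fB (p : Int × Char) : List Char :=
  PySem.Int.toChars (PySem.Int.mod ((PySem.Int.ofChars? [p.2]).getD 0
    - PySem.List.pyGetD tablaB (PySem.Int.mod p.1 60) 0) 10)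

lemma getLast?_cons_ne (a : Char) (l : List Char) (h : l ≠ []) :
    (a :: l).getLast? = l.getLast? := by
  cases l with
  | nil => exact absurd rfl h
  | cons b bs => simp [List.getLast?_cons]

lemma toDigitsCore_getLast? (b f n : Nat) (ds : List Char) (h : ds ≠ []) :
    (Nat.toDigitsCore b f n ds).getLast? = ds.getLast? := by
  induction f generalizing n ds with
  | zero => rfl
  | succ f ih =>
    rw [Nat.toDigitsCore]
    split
    · exact getLast?_cons_ne _ _ h
    · rw [ih _ _ (by simp)]
      exact getLast?_cons_ne _ _ h

lemma toDigits_getLast? (m : Nat) :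
    (Nat.toDigits 10 m).getLast? = some (m % 10).digitChar := by
  rw [Nat.toDigits, Nat.toDigitsCore]
  split
  · rfl
  · rw [toDigitsCore_getLast? _ _ _ _ (by simp)]
    rfl

lemma ofChars?_digitChar (r : Nat) (h : r < 10) :
    PySem.Int.ofChars? [r.digitChar] = some (r : Int) := by
  interval_cases r <;> decide

lemma lastDigitA_eq (x : Int) (hx : 0 ≤ x) : lastDigitA x = PySem.Int.mod x 10 := by
  have hml : (PySem.Int.toChars x).getLast? = some (x.toNat % 10).digitChar := by
    rw [PySem.Int.toChars, if_neg (by omega)]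
    exact toDigits_getLast? x.toNat
  have hne : PySem.Int.toChars x ≠ [] := by
    intro hnil; rw [hnil] at hml; simp at hml
  have hval : (PySem.Int.toChars x).getLast hne = (x.toNat % 10).digitChar := by
    have := List.getLast?_eq_some_getLast (l := PySem.Int.toChars x) hne
    rw [this] at hml
    exact Option.some.inj hml
  rw [lastDigitA, PySem.List.pyGetD_neg_one _ _ hne, hval,
    ofChars?_digitChar _ (by omega), Option.getD_some,
    PySem.Int.mod_eq_emod_of_pos (by norm_num)]
  omega

lemma tabla_getD_bounds (k : Nat) : 0 ≤ tablaB.getD k 0 ∧ tablaB.getD k 0 ≤ 9 := by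
  by_cases h : k < 60
  · have : ∀ j : Fin 60, 0 ≤ tablaB.getD j.val 0 ∧ tablaB.getD j.val 0 ≤ 9 := by decide
    exact this ⟨k, h⟩
  · rw [List.getD_eq_default _ _ (by simp [tablaB]; omega)]
    norm_num

lemma tabla_step60 : ∀ k : Fin 60,
    PySem.Int.mod (tablaB.getD ((k.val + 58) % 60) 0 + tablaB.getD ((k.val + 59) % 60) 0) 10
      = tablaB.getD k.val 0 := by decide

lemma tabla_step (n : Nat) : PySem.Int.mod (tmod n + tmod (n + 1)) 10 = tmod (n + 2) := by
  have h58 : (n + 58) % 60 = (n % 60 + 58) % 60 := by omega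
  have h59 : (n + 1 + 58) % 60 = (n % 60 + 59) % 60 := by omega
  have h60 : (n + 2 + 58) % 60 = n % 60 := by omega
  rw [tmod, tmod, tmod, h58, h59, h60]
  exact tabla_step60 ⟨n % 60, Nat.mod_lt _ (by norm_num)⟩

lemma digit_val_bounds (c : Char) (h : PySem.Chars.isdigit c = true) :
    0 ≤ (PySem.Int.ofChars? [c]).getD 0 ∧ (PySem.Int.ofChars? [c]).getD 0 ≤ 9 := by
  have hb : 48 ≤ c.toNat ∧ c.toNat ≤ 57 := by
    simp only [PySem.Chars.isdigit, Bool.and_eq_true, decide_eq_true_eq] at h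
    exact ⟨h.1, h.2⟩
  have key : ∀ t : Nat, 48 ≤ t → t ≤ 57 →
      0 ≤ (PySem.Int.ofChars? [Char.ofNat t]).getD 0 ∧
        (PySem.Int.ofChars? [Char.ofNat t]).getD 0 ≤ 9 := by
    intro t h1 h2
    interval_cases t <;> decide
  have := key c.toNat hb.1 hb.2
  rwa [Char.ofNat_toNat] at this

lemma coef_if_eq_mod (d t : Int) (hd0 : 0 ≤ d) (hd9 : d ≤ 9) (ht0 : 0 ≤ t) (ht9 : t ≤ 9) :
    (if d - t < 0 then d - t + 10 else d - t) = PySem.Int.mod (d - t) 10 := by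
  rw [PySem.Int.mod_eq_emod_of_pos (by norm_num)]
  split_ifs <;> omega

lemma loopA (cs : List Char) : ∀ (n : Nat) (a b : Int) (acc : List (List Char)),
    (∀ c ∈ cs, PySem.Chars.isdigit c = true) → 0 ≤ a → 0 ≤ b →
    PySem.Int.mod a 10 = tmod n → PySem.Int.mod b 10 = tmod (n + 1) →
    (cs.foldl stepA (a, b, acc)).2.2
      = acc ++ (PySem.List.enumerate cs (n : Int)).map fB := by
  induction cs with
  | nil => intro n a b acc _ _ _ _ _; simp [PySem.List.enumerate_nil]
  | cons c cs ih =>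
    intro n a b acc hdig ha hb hma hmb
    have hdc : PySem.Chars.isdigit c = true := hdig c (List.mem_cons_self ..)
    have hx : (0 : Int) ≤ a + b := by omega
    have hmx : PySem.Int.mod (a + b) 10 = tmod (n + 2) := by
      rw [PySem.Int.mod_eq_emod_of_pos (by norm_num)] at hma hmb ⊢
      rw [← tabla_step n, PySem.Int.mod_eq_emod_of_pos (by norm_num), ← hma, ← hmb,
        Int.add_emod]
    have htab : PySem.List.pyGetD tablaB (PySem.Int.mod (n : Int) 60) 0 = tmod (n + 2) := by
      have : PySem.Int.mod (n : Int) 60 = ((n % 60 : Nat) : Int) := by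
        exact_mod_cast PySem.Int.mod_natCast n 60
      rw [this, PySem.List.pyGetD_natCast, tmod]
      congr 1
      omega
    have hd := digit_val_bounds c hdc
    have ht := tabla_getD_bounds ((n + 2 + 58) % 60)
    rw [List.foldl_cons]
    have hstep : stepA (a, b, acc) c = (b, a + b, acc ++ [fB ((n : Int), c)]) := by
      show (b, a + b, acc ++ [_]) = (b, a + b, acc ++ [fB ((n : Int), c)])
      rw [lastDigitA_eq _ hx, hmx, fB]
      rw [coef_if_eq_mod _ _ hd.1 hd.2 (by rw [tmod] at *; exact ht.1) (by rw [tmod] at *; exact ht.2), htab]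
    rw [hstep, ih (n + 1) b (a + b) (acc ++ [fB ((n : Int), c)])
        (fun c' hc' => hdig c' (List.mem_cons_of_mem _ hc')) hb hx hmb hmx,
      PySem.List.enumerate_cons]
    push_cast
    simp [List.append_assoc]

-- ===== VERDICT (by name: the statement is the Claim_ definition above) =====
theorem costelo_spec : Claim_equal_costelo := by
  intro num _ hpre
  show costelo num = costelo_alt num
  rw [costelo, costelo_alt]
  have hlen : PySem.Str.len num = PySem.List.len num.toList := by
    rw [PySem.Str.len_eq]; rfl
  rw [hlen, PySem.List.foldl_pyRange_pyGetD num.toList ' ' stepA (0, 1, []) le_rfl,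
    show (Int.toNat 0) = 0 from rfl, List.drop_zero]
  have hdig : ∀ c ∈ num.toList, PySem.Chars.isdigit c = true := by
    rw [Pre_costelo, List.all_eq_true] at hpre
    exact fun c hc => hpre c hc
  rw [loopA num.toList 0 0 1 [] hdig le_rfl (by norm_num) (by decide) (by decide)]
  rfl
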